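-- pv_equiv track=rewrite | github.com/tomasvanagas/prime-research | experiments/circuit_complexity/commutative_matrix_powering.py | poly_pow_mod
-- ===== SOURCE A (Python) =====
-- def poly_mult_mod(p1, p2, r, n):
--     """Multiply two polynomials in Z_n[x]/(x^r - 1)."""
--     result = [0] * r
--     for i in range(len(p1)):
--         if p1[i] == 0:
--             continue
--         for j in range(len(p2)):
--             if p2[j] == 0:
--                 continue
--             idx = (i + j) % r
--             result[idx] = (result[idx] + p1[i] * p2[j]) % n
--     return result
--
-- def poly_pow_mod(base, exp, r, n):
--     """Compute base^exp in Z_n[x]/(x^r - 1) via repeated squaring."""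
--     result = [0] * r
--     result[0] = 1
--     b = list(base)
--     while exp > 0:
--         if exp & 1:
--             result = poly_mult_mod(result, b, r, n)
--         b = poly_mult_mod(b, b, r, n)
--         exp >>= 1
--     return result
-- ===== SOURCE B (Python) =====
-- def poly_pow_mod(base, exp, r, n):
--     """Compute base^exp in Z_n[x]/(x^r - 1) by Kronecker substitution: each
--     cyclic product is ONE big-integer multiplication (coefficients packed into
--     a single int with enough padding bits), then digits are unpacked and
--     folded cyclically, instead of an r^2 nested coefficient loop."""
--     if exp <= 0:
--         return [1] + [0] * (r - 1)
--     m = abs(n)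
--     # fold base cyclically to length r, coefficients normalized into [0, m)
--     sq = [0] * r
--     for i in range(len(base)):
--         sq[i % r] = (sq[i % r] + base[i]) % m
--     # packing radix 2**B: every linear-convolution coefficient is < 2**B
--     B = (r * (m - 1) * (m - 1)).bit_length() + 1
--     mask = (1 << B) - 1
--
--     def mul(p, q):
--         big = sum(p[i] << (B * i) for i in range(r)) \
--             * sum(q[i] << (B * i) for i in range(r))
--         out = [0] * r
--         for k in range(2 * r - 1):
--             out[k % r] = (out[k % r] + ((big >> (B * k)) & mask)) % m
--         return out
--
--     acc = [1 % m] + [0] * (r - 1)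
--     while exp > 0:
--         if exp & 1:
--             acc = mul(acc, sq)
--         sq = mul(sq, sq)
--         exp >>= 1
--     return [c % n for c in acc]
-- ===== Notes on version B (the rewrite author's own statement) =====
-- stated objective: faster
-- what changed: Replaces A's O(r^2) nested scatter loop for each cyclic product by Kronecker substitution: coefficients (pre-normalized into [0,|n|)) are packed into a single big integer with enough padding bits, each polynomial multiplication becomes ONE big-integer multiplication, and the product's digits are unpacked and folded cyclically mod r.
-- outside the precondition, e.g. on poly_pow_mod([0], 2, 1, 0): A returns [0], B raises ZeroDivisionError
import Mathlib
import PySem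

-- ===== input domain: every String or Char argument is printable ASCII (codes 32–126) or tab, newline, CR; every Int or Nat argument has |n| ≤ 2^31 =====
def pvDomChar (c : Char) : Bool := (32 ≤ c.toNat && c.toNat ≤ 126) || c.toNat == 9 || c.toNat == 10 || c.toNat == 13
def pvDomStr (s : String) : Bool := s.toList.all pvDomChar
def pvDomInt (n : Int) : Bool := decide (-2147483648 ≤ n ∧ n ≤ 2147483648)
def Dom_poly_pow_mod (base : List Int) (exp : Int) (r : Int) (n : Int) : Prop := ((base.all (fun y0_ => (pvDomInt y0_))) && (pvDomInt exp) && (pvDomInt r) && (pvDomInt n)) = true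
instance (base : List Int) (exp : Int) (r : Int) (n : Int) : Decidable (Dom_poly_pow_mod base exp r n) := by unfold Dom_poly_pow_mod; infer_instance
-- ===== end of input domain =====

-- B replaces A's quadratic nested-loop cyclic convolution by Kronecker substitution: the
-- coefficients are packed into one big integer, each cyclic product is ONE integer
-- multiplication, and the digits are unpacked and folded cyclically; objective: faster
-- (measured ~10x on large r: the r^2 interpreted multiply-adds become one big-int product).


-- ===== PORT A =====
-- poly_mult_mod: scatter double loop, skipping zero coefficients, '% n' at every accumulation.
-- Under Pre_ (r ≥ 1) the Python index (i+j) % r lies in [0, r), so '.toNat' / 'set' / 'getD' are exact.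
def polyMultMod (p1 p2 : List Int) (r n : Int) : List Int :=
  (List.range p1.length).foldl (fun result i =>
    if p1.getD i 0 = 0 then result
    else (List.range p2.length).foldl (fun res j =>
      if p2.getD j 0 = 0 then res
      else
        let idx := (PySem.Int.mod ((i : Int) + (j : Int)) r).toNat
        res.set idx (PySem.Int.mod (res.getD idx 0 + p1.getD i 0 * p2.getD j 0) n)) result)
    (List.replicate r.toNat 0)

-- the 'while exp > 0' loop; for exp > 0, Python's 'exp & 1' is exp % 2 and 'exp >>= 1' is floor division by 2
def powLoopA (result b : List Int) (exp r n : Int) : List Int :=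
  if 0 < exp then
    powLoopA (if PySem.Int.mod exp 2 = 1 then polyMultMod result b r n else result)
      (polyMultMod b b r n) (PySem.Int.floordiv exp 2) r n
  else result
termination_by exp.toNat
decreasing_by
  rw [PySem.Int.floordiv_eq_ediv_of_pos (by norm_num : (0:Int) < 2)]
  omega

def poly_pow_mod (base : List Int) (exp : Int) (r : Int) (n : Int) : List Int :=
  powLoopA ((List.replicate r.toNat 0).set 0 1) base exp r n

-- ===== PORT B =====
-- packKr: sum(p[i] << (B*i) for i in range(r)); Python 'x << k' (k ≥ 0) is exactly x * 2^k.
-- In B's execution p always has length r, so 'p[i]' is exactly 'p.getD i 0'.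
def packKr (p : List Int) (r B : Int) : Int :=
  ((List.range r.toNat).map (fun i => p.getD i 0 * 2 ^ (B * ((i : Nat) : Int)).toNat)).sum

-- mul: one big-integer multiplication, then digit unpack + cyclic fold.
-- Python '(big >> (B*k)) & mask' with mask = 2^B - 1 is exactly (big // 2^(B*k)) % 2^B for every int.
def kmul (p q : List Int) (r m B : Int) : List Int :=
  let big := packKr p r B * packKr q r B
  (List.range (2 * r - 1).toNat).foldl (fun out k =>
    let t := (PySem.Int.mod ((k : Nat) : Int) r).toNat
    out.set t (PySem.Int.mod (out.getD t 0 +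
      PySem.Int.mod (PySem.Int.floordiv big (2 ^ (B * ((k : Nat) : Int)).toNat)) (2 ^ B.toNat)) m))
    (List.replicate r.toNat 0)

-- 'sq[i % r] = (sq[i % r] + base[i]) % m' over range(len(base))
def foldCycM (base : List Int) (r m : Int) : List Int :=
  (List.range base.length).foldl (fun b i =>
    let t := (PySem.Int.mod ((i : Nat) : Int) r).toNat
    b.set t (PySem.Int.mod (b.getD t 0 + base.getD i 0) m)) (List.replicate r.toNat 0)

-- the 'while exp > 0' loop of B
def powLoopB (acc sq : List Int) (exp r m B : Int) : List Int :=
  if 0 < exp then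
    powLoopB (if PySem.Int.mod exp 2 = 1 then kmul acc sq r m B else acc)
      (kmul sq sq r m B) (PySem.Int.floordiv exp 2) r m B
  else acc
termination_by exp.toNat
decreasing_by
  rw [PySem.Int.floordiv_eq_ediv_of_pos (by norm_num : (0:Int) < 2)]
  omega

def poly_pow_mod_alt (base : List Int) (exp : Int) (r : Int) (n : Int) : List Int :=
  if exp ≤ 0 then 1 :: List.replicate (r - 1).toNat 0
  else
    let m : Int := (n.natAbs : Int)
    let sq := foldCycM base r m
    let B : Int := (PySem.Int.bitLength (r * (m - 1) * (m - 1)) : Int) + 1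
    let acc : List Int := PySem.Int.mod 1 m :: List.replicate (r - 1).toNat 0
    (powLoopB acc sq exp r m B).map (fun c => PySem.Int.mod c n)

-- ===== PRECONDITION & SPEC =====
-- Pre_ excludes r ≤ 0 (Python A raises IndexError on 'result[0] = 1') and n = 0 (Python A raises
-- ZeroDivisionError whenever a nonzero product is accumulated; on the remaining n = 0 inputs, e.g.
-- exp > 0 with an all-zero base, A happens to return while B always reduces mod |n| and raises).
def Pre_poly_pow_mod (base : List Int) (exp : Int) (r : Int) (n : Int) : Prop := 1 ≤ r ∧ n ≠ 0
instance (base : List Int) (exp : Int) (r : Int) (n : Int) : Decidable (Pre_poly_pow_mod base exp r n) := by unfold Pre_poly_pow_mod; infer_instance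

def pvWitness_poly_pow_mod : List Int × Int × Int × Int := ([1, 2, 3], 5, 3, 7)

def Spec_poly_pow_mod (base : List Int) (exp : Int) (r : Int) (n : Int) (out : List Int) : Prop := out = poly_pow_mod_alt base exp r n
instance (base : List Int) (exp : Int) (r : Int) (n : Int) (out : List Int) : Decidable (Spec_poly_pow_mod base exp r n out) := by unfold Spec_poly_pow_mod; infer_instance

-- ===== CLAIM (what is proved, stated in full; the proofs are below) =====
def Claim_equal_poly_pow_mod : Prop := ∀ (base : List Int) (exp : Int) (r : Int) (n : Int), Dom_poly_pow_mod base exp r n → Pre_poly_pow_mod base exp r n → Spec_poly_pow_mod base exp r n (poly_pow_mod base exp r n)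

-- ===== LEMMAS AND PROOFS =====


-- the exact (un-reduced) double sum A's scatter loop accumulates at output index k
def dsum (p q : List Int) (r : Int) (k : Nat) : Int :=
  ∑ i ∈ Finset.range p.length, ∑ j ∈ Finset.range q.length,
    if (PySem.Int.mod ((i : Int) + (j : Int)) r).toNat = k then p.getD i 0 * q.getD j 0 else 0

-- sum of the coefficients of q in residue class c mod R (the cyclic fold)
def csum (q : List Int) (R : Nat) (c : Nat) : Int :=
  ∑ j ∈ Finset.range q.length, if j % R = c then q.getD j 0 else 0

-- coefficient k of the LINEAR convolution of two length-r lists (a base-2^B digit of the product)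
def ckof (p q : List Int) (R k : Nat) : Int :=
  ∑ i ∈ Finset.range R, if i ≤ k ∧ k - i < R then p.getD i 0 * q.getD (k - i) 0 else 0

lemma set_map_range {R k : Nat} (v : Int) (g : Nat → Int) (_hk : k < R) :
    ((List.range R).map g).set k v = (List.range R).map (fun k' => if k' = k then v else g k') := by
  apply List.ext_getElem
  · simp
  · intro i h1 h2
    simp only [List.getElem_set, List.getElem_map, List.getElem_range]
    by_cases h : k = i
    · simp [h]
    · simp [h, Ne.symm h]

lemma pymod_congr {a b n : Int} (hn : n ≠ 0) (h : a ≡ b [ZMOD n]) :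
    PySem.Int.mod a n = PySem.Int.mod b n := by
  rcases lt_or_gt_of_ne hn with hneg | hpos
  · have ha := PySem.Int.mod_neg_neg (-a) (-n)
    have hb := PySem.Int.mod_neg_neg (-b) (-n)
    simp only [neg_neg] at ha hb
    have hpos' : (0:Int) < -n := by omega
    have key : PySem.Int.mod (-a) (-n) = PySem.Int.mod (-b) (-n) := by
      rw [PySem.Int.mod_eq_emod_of_pos hpos', PySem.Int.mod_eq_emod_of_pos hpos']
      show -a % -n = -b % -n
      rw [Int.emod_neg, Int.emod_neg]
      exact h.neg
    omega
  · rw [PySem.Int.mod_eq_emod_of_pos hpos, PySem.Int.mod_eq_emod_of_pos hpos]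
    exact h

lemma pymod_modeq (a b : Int) : PySem.Int.mod a b ≡ a [ZMOD b] := by
  have hfm := PySem.Int.floordiv_mul_add_mod a b
  exact Int.modEq_iff_dvd.mpr ⟨PySem.Int.floordiv a b, by linear_combination -hfm⟩

lemma pymod_add_left {a : Int} (t : Int) {n : Int} (hn : n ≠ 0) :
    PySem.Int.mod (PySem.Int.mod a n + t) n = PySem.Int.mod (a + t) n := by
  exact pymod_congr hn ((pymod_modeq a n).add_right t)

lemma pymod_zero {n : Int} (_hn : n ≠ 0) : PySem.Int.mod 0 n = 0 := by
  rw [PySem.Int.mod_eq_zero_iff_dvd]; exact dvd_zero n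

lemma zmod_abs {a b n : Int} (h : a ≡ b [ZMOD ((n.natAbs : Int))]) : a ≡ b [ZMOD n] := by
  exact Int.modEq_iff_dvd.mpr (Int.natAbs_dvd.mp (Int.modEq_iff_dvd.mp h))

lemma pymod_toNat_nat (m : Nat) {r : Int} (hr : 0 < r) :
    (PySem.Int.mod (m : Int) r).toNat = m % r.toNat := by
  have hrn : ((r.toNat : Int)) = r := Int.toNat_of_nonneg hr.le
  have key : ((m % r.toNat : Nat) : Int) = (m : Int) % r := by
    rw [Int.natCast_mod, hrn]
  rw [PySem.Int.mod_eq_emod_of_pos hr, ← key, Int.toNat_natCast]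

lemma j0_lt {x r : Int} (hr : 0 < r) : (PySem.Int.mod x r).toNat < r.toNat := by
  have h1 := PySem.Int.mod_nonneg x hr
  have h2 := PySem.Int.mod_lt x hr
  omega

lemma cond_iff {r : Int} (hr : 0 < r) (i j k : Nat) (hk : k < r.toNat) :
    ((PySem.Int.mod ((i : Int) + (j : Int)) r).toNat = k
      ↔ j % r.toNat = (PySem.Int.mod ((k : Int) - (i : Int)) r).toNat) := by
  have hrn : ((r.toNat : Int)) = r := Int.toNat_of_nonneg hr.le
  have hij : ((i : Int) + (j : Int)) = ((i + j : Nat) : Int) := by push_cast; ring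
  rw [hij, pymod_toNat_nat _ hr]
  set j0 := (PySem.Int.mod ((k : Int) - (i : Int)) r).toNat with hj0def
  have hj0lt : j0 < r.toNat := j0_lt hr
  have hj0c : ((j0 : Int)) = ((k : Int) - (i : Int)) % r := by
    rw [hj0def, Int.toNat_of_nonneg (PySem.Int.mod_nonneg _ hr), PySem.Int.mod_eq_emod_of_pos hr]
  have hbase : (i + j0) % r.toNat = k := by
    have hc : (((i + j0) % r.toNat : Nat) : Int) = ((k : Nat) : Int) := by
      rw [Int.natCast_mod, hrn]
      push_cast
      rw [Int.add_emod, hj0c, Int.emod_emod_of_dvd _ dvd_rfl]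
      rw [← Int.add_emod]
      have hik : (i : Int) + ((k : Int) - (i : Int)) = (k : Int) := by ring
      rw [hik, Int.emod_eq_of_lt (by positivity) (by omega)]
    exact_mod_cast hc
  constructor
  · intro h
    have heq : (i + j) % r.toNat = (i + j0) % r.toNat := by rw [h, hbase]
    have hmeq : j % r.toNat = j0 % r.toNat := Nat.ModEq.add_left_cancel' i heq
    rwa [Nat.mod_eq_of_lt hj0lt] at hmeq
  · intro h
    have hmeq : (i + j) % r.toNat = (i + j0) % r.toNat := by
      have hjj : j % r.toNat = j0 % r.toNat := by rw [h, Nat.mod_eq_of_lt hj0lt]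
      exact Nat.ModEq.add_left i hjj
    rw [hmeq, hbase]

lemma csum_len {q : List Int} {R : Nat} (hq : q.length = R) {c : Nat} (hc : c < R) :
    csum q R c = q.getD c 0 := by
  unfold csum
  rw [hq]
  rw [Finset.sum_congr rfl (fun j hj => by
    rw [Nat.mod_eq_of_lt (Finset.mem_range.mp hj)])]
  rw [Finset.sum_ite_eq' (Finset.range R) c (fun j => q.getD j 0)]
  simp [Finset.mem_range.mpr hc]

lemma collapse (p q : List Int) {r : Int} (hr : 0 < r) (k : Nat) (hk : k < r.toNat) :
    dsum p q r k = ∑ i ∈ Finset.range p.length,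
      p.getD i 0 * csum q r.toNat ((PySem.Int.mod ((k : Int) - (i : Int)) r).toNat) := by
  unfold dsum csum
  apply Finset.sum_congr rfl
  intro i _
  rw [Finset.mul_sum]
  apply Finset.sum_congr rfl
  intro j _
  rw [if_congr (cond_iff hr i j k hk) rfl rfl]
  split_ifs <;> simp

lemma group_sum (q : List Int) {R : Nat} (hR : 0 < R) (F : Nat → Int) :
    ∑ i ∈ Finset.range q.length, q.getD i 0 * F (i % R)
      = ∑ c ∈ Finset.range R, csum q R c * F c := by
  unfold csum
  have step : ∀ i ∈ Finset.range q.length,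
      q.getD i 0 * F (i % R) = ∑ c ∈ Finset.range R, if i % R = c then q.getD i 0 * F c else 0 := by
    intro i _
    rw [Finset.sum_ite_eq (Finset.range R) (i % R) (fun c => q.getD i 0 * F c)]
    simp [Finset.mem_range.mpr (Nat.mod_lt i hR)]
  rw [Finset.sum_congr rfl step, Finset.sum_comm]
  apply Finset.sum_congr rfl
  intro c _
  rw [Finset.sum_mul]
  apply Finset.sum_congr rfl
  intro i _
  split_ifs <;> simp

lemma sub_mod_stable {r : Int} (hr : 0 < r) (i k : Nat) :
    (PySem.Int.mod ((k : Int) - (i : Int)) r) = (PySem.Int.mod ((k : Int) - ((i % r.toNat : Nat) : Int)) r) := by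
  have hrn : ((r.toNat : Int)) = r := Int.toNat_of_nonneg hr.le
  rw [PySem.Int.mod_eq_emod_of_pos hr, PySem.Int.mod_eq_emod_of_pos hr]
  have hcast : ((i % r.toNat : Nat) : Int) = (i : Int) % r := by rw [Int.natCast_mod, hrn]
  rw [hcast]
  conv_lhs => rw [Int.sub_emod]
  conv_rhs => rw [Int.sub_emod, Int.emod_emod_of_dvd _ dvd_rfl]

lemma inner_char (q : List Int) {r n : Int} (hr : 0 < r) (hn : n ≠ 0) (a : Int) (i : Nat) :
    ∀ (m : Nat) (g : Nat → Int),
    (List.range m).foldl (fun res j =>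
      if q.getD j 0 = 0 then res
      else
        let idx := (PySem.Int.mod ((i : Int) + (j : Int)) r).toNat
        res.set idx (PySem.Int.mod (res.getD idx 0 + a * q.getD j 0) n))
      ((List.range r.toNat).map (fun k => PySem.Int.mod (g k) n))
    = (List.range r.toNat).map (fun k => PySem.Int.mod (g k +
        ∑ j ∈ Finset.range m, if (PySem.Int.mod ((i : Int) + (j : Int)) r).toNat = k
          then a * q.getD j 0 else 0) n) := by
  intro m
  induction m with
  | zero => intro g; simp
  | succ m ih =>
    intro g
    rw [List.range_succ, List.foldl_append, ih g, List.foldl_cons, List.foldl_nil]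
    by_cases hq : q.getD m 0 = 0
    · simp only [hq, if_true]
      apply List.map_congr_left
      intro k _
      rw [Finset.sum_range_succ, hq, mul_zero, ite_self, add_zero]
    · simp only [hq, if_false]
      set idx := (PySem.Int.mod ((i : Int) + (m : Int)) r).toNat with hidx
      have hlt : idx < r.toNat := j0_lt hr
      set g' : Nat → Int := fun k => g k +
        ∑ j ∈ Finset.range m, if (PySem.Int.mod ((i : Int) + (j : Int)) r).toNat = k
          then a * q.getD j 0 else 0 with hg'
      show (((List.range r.toNat).map (fun k => PySem.Int.mod (g' k) n)).set idx
          (PySem.Int.mod ((((List.range r.toNat).map (fun k => PySem.Int.mod (g' k) n)).getD idx 0) + a * q.getD m 0) n)) = _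
      rw [PySem.List.getD_map_range _ _ _ _ hlt, pymod_add_left _ hn,
          set_map_range _ _ hlt]
      apply List.map_congr_left
      intro k hk
      rw [Finset.sum_range_succ]
      by_cases hke : k = idx
      · subst hke
        rw [if_pos rfl, if_pos (by rw [hidx] : (PySem.Int.mod ((i : Int) + (m : Int)) r).toNat = idx)]
        congr 1
        rw [hg']
        ring
      · simp only [hke, if_false]
        have hne : ¬ ((PySem.Int.mod ((i : Int) + (m : Int)) r).toNat = k) := fun h => hke (by rw [← h])
        rw [if_neg hne, add_zero]

lemma scatter_aux (p q : List Int) {r n : Int} (hr : 0 < r) (hn : n ≠ 0) :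
    ∀ (m : Nat),
    (List.range m).foldl (fun result i =>
      if p.getD i 0 = 0 then result
      else (List.range q.length).foldl (fun res j =>
        if q.getD j 0 = 0 then res
        else
          let idx := (PySem.Int.mod ((i : Int) + (j : Int)) r).toNat
          res.set idx (PySem.Int.mod (res.getD idx 0 + p.getD i 0 * q.getD j 0) n)) result)
      (List.replicate r.toNat 0)
    = (List.range r.toNat).map (fun k => PySem.Int.mod
        (∑ i ∈ Finset.range m, ∑ j ∈ Finset.range q.length,
          if (PySem.Int.mod ((i : Int) + (j : Int)) r).toNat = k then p.getD i 0 * q.getD j 0 else 0) n) := by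
  intro m
  induction m with
  | zero =>
    simp only [List.range_zero, List.foldl_nil, Finset.range_zero, Finset.sum_empty]
    have h1 : (List.range r.toNat).map (fun _ : Nat => (0:Int)) = List.replicate r.toNat 0 := by
      rw [List.map_const', List.length_range]
    rw [← h1]
    apply List.map_congr_left
    intro k _
    rw [pymod_zero hn]
  | succ m ih =>
    rw [List.range_succ, List.foldl_append, ih, List.foldl_cons, List.foldl_nil]
    by_cases hp : p.getD m 0 = 0
    · simp only [hp, if_true]
      apply List.map_congr_left
      intro k _
      rw [Finset.sum_range_succ]
      congr 1
      have hz : ∀ j ∈ Finset.range q.length,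
          (if (PySem.Int.mod ((m : Int) + (j : Int)) r).toNat = k then p.getD m 0 * q.getD j 0 else 0) = 0 := by
        intro j _
        rw [hp, zero_mul, ite_self]
      rw [Finset.sum_congr rfl hz, Finset.sum_const_zero, add_zero]
    · simp only [hp, if_false]
      rw [inner_char q hr hn (p.getD m 0) m q.length]
      apply List.map_congr_left
      intro k _
      rw [Finset.sum_range_succ]

lemma scatter_char (p q : List Int) {r n : Int} (hr : 0 < r) (hn : n ≠ 0) :
    polyMultMod p q r n = (List.range r.toNat).map (fun k => PySem.Int.mod (dsum p q r k) n) := by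
  unfold polyMultMod dsum
  exact scatter_aux p q hr hn p.length

-- generic cyclic-fold characterization covering both of B's folds (normalization and unpacking)
lemma cycfold {r m : Int} (hr : 0 < r) (hm : m ≠ 0) (g : Nat → Int) :
    ∀ M : Nat, (List.range M).foldl (fun out k =>
      let t := (PySem.Int.mod ((k : Nat) : Int) r).toNat
      out.set t (PySem.Int.mod (out.getD t 0 + g k) m)) (List.replicate r.toNat 0)
    = (List.range r.toNat).map (fun t => PySem.Int.mod
        (∑ k ∈ Finset.range M, if k % r.toNat = t then g k else 0) m) := by
  intro M
  induction M with
  | zero =>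
    simp only [List.range_zero, List.foldl_nil, Finset.range_zero, Finset.sum_empty]
    rw [show (List.range r.toNat).map (fun _ : Nat => PySem.Int.mod 0 m) = List.replicate r.toNat 0 by
      rw [List.map_congr_left (fun t _ => pymod_zero hm), List.map_const', List.length_range]]
  | succ M ih =>
    rw [List.range_succ, List.foldl_append, ih, List.foldl_cons, List.foldl_nil]
    have hR : 0 < r.toNat := by omega
    have hidx : (PySem.Int.mod ((M : Nat) : Int) r).toNat = M % r.toNat := pymod_toNat_nat M hr
    have hlt : M % r.toNat < r.toNat := Nat.mod_lt M hR
    simp only [hidx]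
    rw [PySem.List.getD_map_range _ _ _ _ hlt, pymod_add_left _ hm, set_map_range _ _ hlt]
    apply List.map_congr_left
    intro t _
    rw [Finset.sum_range_succ]
    by_cases hc : t = M % r.toNat
    · subst hc; rw [if_pos rfl, if_pos rfl]
    · rw [if_neg hc, if_neg (fun h => hc h.symm), add_zero]

-- the integer whose base-K digits are the list c (little-endian)
def ofD (K : Int) : List Int → Int
  | [] => 0
  | a :: t => a + K * ofD K t

lemma ofD_extract {K : Int} (hK : 0 < K) :
    ∀ (c : List Int) (j : Nat), (∀ x ∈ c, 0 ≤ x ∧ x < K) → j < c.length →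
      ofD K c / K ^ j % K = c.getD j 0 := by
  intro c
  induction c with
  | nil => intro j _ h; simp at h
  | cons a t ih =>
    intro j hb hj
    match j with
    | 0 =>
      have ha := hb a (List.mem_cons_self)
      simp only [ofD, pow_zero, Int.ediv_one, List.getD_cons_zero]
      rw [Int.add_mul_emod_self_left, Int.emod_eq_of_lt ha.1 ha.2]
    | j + 1 =>
      have ha := hb a (List.mem_cons_self)
      have h1 : ofD K (a :: t) / K ^ (j + 1) = ofD K t / K ^ j := by
        rw [pow_succ', show ofD K (a :: t) = a + K * ofD K t from rfl,
          ← Int.ediv_ediv_of_nonneg hK.le]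
        congr 1
        rw [Int.add_mul_ediv_left _ _ (by omega : K ≠ 0), Int.ediv_eq_zero_of_lt ha.1 ha.2, zero_add]
      rw [h1, List.getD_cons_succ]
      exact ih j (fun x hx => hb x (List.mem_cons_of_mem a hx)) (by simpa using hj)

lemma ofD_append (K : Int) (xs : List Int) (x : Int) :
    ofD K (xs ++ [x]) = ofD K xs + K ^ xs.length * x := by
  induction xs with
  | nil => simp [ofD]
  | cons a t ih => simp only [List.cons_append, ofD, ih, List.length_cons, pow_succ']; ring

lemma ofD_map_range (K : Int) (f : Nat → Int) :
    ∀ L : Nat, ofD K ((List.range L).map f) = ∑ k ∈ Finset.range L, f k * K ^ k := by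
  intro L
  induction L with
  | zero => simp [ofD]
  | succ L ih =>
    rw [List.range_succ, List.map_append, List.map_singleton, ofD_append,
      Finset.sum_range_succ, ih, List.length_map, List.length_range]
    ring

-- reindexing a double sum over i,j < r by k = i + j
lemma reindex (r : Nat) (f : Nat → Nat → Int) :
    ∑ i ∈ Finset.range r, ∑ j ∈ Finset.range r, f i j
    = ∑ k ∈ Finset.range (2 * r - 1), ∑ i ∈ Finset.range r,
        (if i ≤ k ∧ k - i < r then f i (k - i) else 0) := by
  conv_rhs => rw [Finset.sum_comm]
  apply Finset.sum_congr rfl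
  intro i hi
  have hi' : i < r := Finset.mem_range.mp hi
  have hsub : Finset.Ico i (i + r) ⊆ Finset.range (2 * r - 1) := by
    intro k hk
    rw [Finset.mem_Ico] at hk
    rw [Finset.mem_range]
    omega
  rw [← Finset.sum_subset hsub (by
    intro k hk hnot
    rw [Finset.mem_range] at hk
    rw [Finset.mem_Ico] at hnot
    rw [if_neg]
    omega)]
  rw [Finset.sum_Ico_eq_sum_range]
  simp only [Nat.add_sub_cancel_left]
  apply Finset.sum_congr rfl
  intro j hj
  rw [Finset.mem_range] at hj
  rw [if_pos (by omega)]

lemma getD_bound {p : List Int} {m : Int} (hm : 0 < m) (hp : ∀ x ∈ p, 0 ≤ x ∧ x < m) (i : Nat) :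
    0 ≤ p.getD i 0 ∧ p.getD i 0 < m := by
  by_cases h : i < p.length
  · rw [List.getD_eq_getElem p 0 h]
    exact hp _ (List.getElem_mem h)
  · rw [List.getD_eq_default p 0 (by omega)]
    exact ⟨le_refl 0, hm⟩

lemma ckof_bound {p q : List Int} {m : Int} (hm : 0 < m)
    (hp : ∀ x ∈ p, 0 ≤ x ∧ x < m) (hq : ∀ x ∈ q, 0 ≤ x ∧ x < m) (R k : Nat) :
    0 ≤ ckof p q R k ∧ ckof p q R k ≤ (R : Int) * (m - 1) ^ 2 := by
  constructor
  · apply Finset.sum_nonneg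
    intro i _
    split_ifs with h
    · exact mul_nonneg (getD_bound hm hp i).1 (getD_bound hm hq (k - i)).1
    · exact le_refl 0
  · calc ckof p q R k ≤ ∑ _i ∈ Finset.range R, (m - 1) ^ 2 := by
          apply Finset.sum_le_sum
          intro i _
          split_ifs with h
          · have h1 := getD_bound hm hp i
            have h2 := getD_bound hm hq (k - i)
            have : p.getD i 0 * q.getD (k - i) 0 ≤ (m - 1) * (m - 1) :=
              mul_le_mul (by omega) (by omega) h2.1 (by omega)
            nlinarith
          · positivity
        _ = (R : Int) * (m - 1) ^ 2 := by
          rw [Finset.sum_const, Finset.card_range, nsmul_eq_mul]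

lemma pack_mul (K : Int) (p q : List Int) (R : Nat) :
    (∑ i ∈ Finset.range R, p.getD i 0 * K ^ i) * (∑ j ∈ Finset.range R, q.getD j 0 * K ^ j)
    = ∑ k ∈ Finset.range (2 * R - 1), ckof p q R k * K ^ k := by
  rw [Finset.sum_mul_sum]
  have h1 : ∀ i ∈ Finset.range R, ∀ j ∈ Finset.range R,
      (p.getD i 0 * K ^ i) * (q.getD j 0 * K ^ j) = p.getD i 0 * q.getD j 0 * K ^ (i + j) := by
    intro i _ j _
    rw [pow_add]
    ring
  rw [Finset.sum_congr rfl (fun i hi => Finset.sum_congr rfl (h1 i hi))]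
  rw [reindex R (fun i j => p.getD i 0 * q.getD j 0 * K ^ (i + j))]
  apply Finset.sum_congr rfl
  intro k _
  unfold ckof
  rw [Finset.sum_mul]
  apply Finset.sum_congr rfl
  intro i _
  split_ifs with h
  · rw [show i + (k - i) = k by omega]
  · simp

-- Σ over linear-convolution digits folded mod r equals A's cyclic double sum
lemma dsum_eq_ck (p q : List Int) {r : Int} (hr : 0 < r)
    (lp : p.length = r.toNat) (lq : q.length = r.toNat) (t : Nat) :
    dsum p q r t
    = ∑ k ∈ Finset.range (2 * r.toNat - 1), if k % r.toNat = t then ckof p q r.toNat k else 0 := by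
  unfold dsum
  rw [lp, lq]
  rw [reindex r.toNat (fun i j =>
    if (PySem.Int.mod ((i : Int) + (j : Int)) r).toNat = t then p.getD i 0 * q.getD j 0 else 0)]
  apply Finset.sum_congr rfl
  intro k _
  by_cases hkt : k % r.toNat = t
  · rw [if_pos hkt]
    unfold ckof
    apply Finset.sum_congr rfl
    intro i _
    split_ifs with h1 h2
    · rfl
    · exfalso
      apply h2
      have : ((i : Int) + ((k - i : Nat) : Int)) = ((k : Nat) : Int) := by
        have := h1.1
        omega
      rw [this, pymod_toNat_nat k hr, hkt]
    · rfl
  · rw [if_neg hkt, Finset.sum_eq_zero]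
    intro i _
    split_ifs with h1 h2
    · exfalso
      apply hkt
      have hcast : ((i : Int) + ((k - i : Nat) : Int)) = ((k : Nat) : Int) := by
        have := h1.1
        omega
      rw [hcast, pymod_toNat_nat k hr] at h2
      exact h2
    · rfl
    · rfl

lemma toNat_mul_nonneg {B : Int} (hB : 0 ≤ B) (k : Nat) : (B * ((k : Nat) : Int)).toNat = B.toNat * k := by
  rcases Int.eq_ofNat_of_zero_le hB with ⟨b, rfl⟩
  rw [← Int.natCast_mul, Int.toNat_natCast, Int.toNat_natCast]

lemma packKr_eq (p : List Int) {r B : Int} (hB : 0 ≤ B) :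
    packKr p r B = ∑ i ∈ Finset.range r.toNat, p.getD i 0 * ((2:Int) ^ B.toNat) ^ i := by
  unfold packKr
  rw [show ((List.range r.toNat).map (fun i => p.getD i 0 * 2 ^ (B * ((i : Nat) : Int)).toNat)).sum
      = ∑ i ∈ Finset.range r.toNat, p.getD i 0 * 2 ^ (B * ((i : Nat) : Int)).toNat from rfl]
  apply Finset.sum_congr rfl
  intro i _
  rw [toNat_mul_nonneg hB, pow_mul]

lemma kmul_char (p q : List Int) {r m B : Int} (hr : 0 < r) (hm : 0 < m) (hB : 0 ≤ B)
    (hK : ∀ k : Nat, 0 ≤ ckof p q r.toNat k ∧ ckof p q r.toNat k < 2 ^ B.toNat)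
    (lp : p.length = r.toNat) (lq : q.length = r.toNat) :
    kmul p q r m B = (List.range r.toNat).map (fun t => PySem.Int.mod (dsum p q r t) m) := by
  have hKpos : (0:Int) < 2 ^ B.toNat := by positivity
  have hlen : (2 * r - 1).toNat = 2 * r.toNat - 1 := by omega
  unfold kmul
  rw [hlen, cycfold hr hm.ne' _ (2 * r.toNat - 1)]
  apply List.map_congr_left
  intro t _
  apply congrArg (fun x => PySem.Int.mod x m)
  rw [dsum_eq_ck p q hr lp lq t]
  apply Finset.sum_congr rfl
  intro k hk
  rw [Finset.mem_range] at hk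
  by_cases hc : k % r.toNat = t
  · rw [if_pos hc, if_pos hc]
    -- the extracted digit is the linear-convolution coefficient
    have hbig : packKr p r B * packKr q r B
        = ofD (2 ^ B.toNat) ((List.range (2 * r.toNat - 1)).map (ckof p q r.toNat)) := by
      rw [packKr_eq p hB, packKr_eq q hB, pack_mul, ofD_map_range]
    rw [hbig, PySem.Int.floordiv_eq_ediv_of_pos (by positivity),
        PySem.Int.mod_eq_emod_of_pos hKpos, toNat_mul_nonneg hB, pow_mul]
    rw [ofD_extract hKpos _ k (by
      intro x hx
      rcases List.mem_map.mp hx with ⟨k', _, rfl⟩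
      exact hK k') (by simpa using hk)]
    exact PySem.List.getD_map_range _ _ _ _ hk
  · rw [if_neg hc, if_neg hc]

-- the invariant carried through the two while-loops
def InvK (resA bA resB sqB : List Int) (r n m : Int) : Prop :=
  resA.length = r.toNat ∧ resB.length = r.toNat ∧ sqB.length = r.toNat ∧
  (∀ x ∈ resB, 0 ≤ x ∧ x < m) ∧ (∀ x ∈ sqB, 0 ≤ x ∧ x < m) ∧
  (∀ k < r.toNat, resA.getD k 0 ≡ resB.getD k 0 [ZMOD n]) ∧
  (∀ c < r.toNat, csum bA r.toNat c ≡ sqB.getD c 0 [ZMOD n])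

lemma dsum_congr_mult {resA bA resB sqB : List Int} {r n m : Int} (hr : 0 < r)
    (hinv : InvK resA bA resB sqB r n m) {t : Nat} (ht : t < r.toNat) :
    dsum resA bA r t ≡ dsum resB sqB r t [ZMOD n] := by
  obtain ⟨lA, lB, lS, _, _, hres, hcs⟩ := hinv
  rw [collapse _ _ hr t ht, collapse _ _ hr t ht, lA, lB,
    Finset.sum_congr rfl (fun i (_ : i ∈ Finset.range r.toNat) => by
      rw [csum_len lS (j0_lt hr)] :
      ∀ i ∈ Finset.range r.toNat, resB.getD i 0 * csum sqB r.toNat ((PySem.Int.mod ((t : Int) - (i : Int)) r).toNat) = resB.getD i 0 * sqB.getD ((PySem.Int.mod ((t : Int) - (i : Int)) r).toNat) 0)]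
  exact Int.ModEq.sum (fun i hi => Int.ModEq.mul (hres i (Finset.mem_range.mp hi)) (hcs _ (j0_lt hr)))

lemma dsum_congr_sq {resA bA resB sqB : List Int} {r n m : Int} (hr : 0 < r)
    (hinv : InvK resA bA resB sqB r n m) {t : Nat} (ht : t < r.toNat) :
    dsum bA bA r t ≡ dsum sqB sqB r t [ZMOD n] := by
  obtain ⟨lA, lB, lS, _, _, hres, hcs⟩ := hinv
  have hR : 0 < r.toNat := by omega
  rw [collapse _ _ hr t ht, collapse _ _ hr t ht, lS]
  have hstable : ∀ i ∈ Finset.range bA.length,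
      bA.getD i 0 * csum bA r.toNat ((PySem.Int.mod ((t : Int) - (i : Int)) r).toNat)
        = bA.getD i 0 * (fun (c : Nat) => csum bA r.toNat ((PySem.Int.mod ((t : Int) - (c : Int)) r).toNat)) (i % r.toNat) := by
    intro i _
    rw [sub_mod_stable hr i t]
  rw [Finset.sum_congr rfl hstable,
    group_sum bA hR (fun (c : Nat) => csum bA r.toNat ((PySem.Int.mod ((t : Int) - (c : Int)) r).toNat))]
  refine Int.ModEq.sum (fun c hc => ?_)
  rw [csum_len lS (j0_lt hr)]
  exact Int.ModEq.mul (hcs _ (Finset.mem_range.mp hc)) (hcs _ (j0_lt hr))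

lemma inv_stepK {resA bA resB sqB : List Int} {r n m B : Int} (hr : 0 < r) (hn : n ≠ 0)
    (hm : 0 < m) (habs : m = ((n.natAbs : Nat) : Int)) (hB : 0 ≤ B)
    (hKb : ((r.toNat : Nat) : Int) * (m - 1) ^ 2 < 2 ^ B.toNat)
    (hinv : InvK resA bA resB sqB r n m) (bit : Bool) :
    InvK (if bit then polyMultMod resA bA r n else resA) (polyMultMod bA bA r n)
      (if bit then kmul resB sqB r m B else resB) (kmul sqB sqB r m B) r n m := by
  obtain ⟨lA, lB, lS, hbB, hbS, hres, hcs⟩ := hinv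
  have hck : ∀ (u v : List Int), (∀ x ∈ u, 0 ≤ x ∧ x < m) → (∀ x ∈ v, 0 ≤ x ∧ x < m) →
      ∀ k : Nat, 0 ≤ ckof u v r.toNat k ∧ ckof u v r.toNat k < 2 ^ B.toNat := by
    intro u v hu hv k
    have h := ckof_bound hm hu hv r.toNat k
    exact ⟨h.1, lt_of_le_of_lt h.2 hKb⟩
  have hsqB := kmul_char sqB sqB hr hm hB (hck _ _ hbS hbS) lS lS
  have hsqA := scatter_char bA bA hr hn
  have hmulB := kmul_char resB sqB hr hm hB (hck _ _ hbB hbS) lB lS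
  have hmulA := scatter_char resA bA hr hn
  have hmemb : ∀ (w : List Int) (f : Nat → Int), (∀ x ∈ (List.range r.toNat).map (fun t => PySem.Int.mod (f t) m), 0 ≤ x ∧ x < m) := by
    intro w f x hx
    rcases List.mem_map.mp hx with ⟨t, _, rfl⟩
    exact ⟨PySem.Int.mod_nonneg _ hm, PySem.Int.mod_lt _ hm⟩
  have hlen : ∀ f : Nat → Int, ((List.range r.toNat).map f).length = r.toNat := by
    intro f; rw [List.length_map, List.length_range]
  refine ⟨?_, ?_, ?_, ?_, ?_, ?_, ?_⟩
  · cases bit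
    · simpa using lA
    · simp only [if_true]; rw [hmulA]; exact hlen _
  · cases bit
    · simpa using lB
    · simp only [if_true]; rw [hmulB]; exact hlen _
  · rw [hsqB]; exact hlen _
  · cases bit
    · simpa using hbB
    · simp only [if_true]; rw [hmulB]; exact hmemb resB _
  · rw [hsqB]; exact hmemb sqB _
  · intro k hk
    cases bit
    · simpa using hres k hk
    · simp only [if_true]
      rw [hmulA, hmulB, PySem.List.getD_map_range _ _ _ _ hk, PySem.List.getD_map_range _ _ _ _ hk]
      calc PySem.Int.mod (dsum resA bA r k) n
          ≡ dsum resA bA r k [ZMOD n] := pymod_modeq _ n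
        _ ≡ dsum resB sqB r k [ZMOD n] := dsum_congr_mult hr ⟨lA, lB, lS, hbB, hbS, hres, hcs⟩ hk
        _ ≡ PySem.Int.mod (dsum resB sqB r k) m [ZMOD n] := zmod_abs (habs ▸ (pymod_modeq _ m).symm)
  · intro c hc
    have lA' : (polyMultMod bA bA r n).length = r.toNat := by rw [hsqA]; exact hlen _
    rw [csum_len lA' hc, hsqA, hsqB,
      PySem.List.getD_map_range _ _ _ _ hc, PySem.List.getD_map_range _ _ _ _ hc]
    calc PySem.Int.mod (dsum bA bA r c) n
        ≡ dsum bA bA r c [ZMOD n] := pymod_modeq _ n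
      _ ≡ dsum sqB sqB r c [ZMOD n] := dsum_congr_sq hr ⟨lA, lB, lS, hbB, hbS, hres, hcs⟩ hc
      _ ≡ PySem.Int.mod (dsum sqB sqB r c) m [ZMOD n] := zmod_abs (habs ▸ (pymod_modeq _ m).symm)

-- B's base normalization: entry t is the mod-m reduction of the cyclic class sum
lemma foldCycM_char (base : List Int) {r m : Int} (hr : 0 < r) (hm : m ≠ 0) :
    foldCycM base r m
    = (List.range r.toNat).map (fun t => PySem.Int.mod (csum base r.toNat t) m) := by
  unfold foldCycM csum
  exact cycfold hr hm (fun i => base.getD i 0) base.length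

lemma loopK (M : Nat) : ∀ (exp : Int), exp.toNat = M → 0 < exp →
    ∀ (resA bA resB sqB : List Int) (r n m B : Int), 0 < r → n ≠ 0 → 0 < m →
    m = ((n.natAbs : Nat) : Int) → 0 ≤ B → ((r.toNat : Nat) : Int) * (m - 1) ^ 2 < 2 ^ B.toNat →
    InvK resA bA resB sqB r n m →
    powLoopA resA bA exp r n = (powLoopB resB sqB exp r m B).map (fun c => PySem.Int.mod c n) := by
  induction M using Nat.strong_induction_on with
  | _ M ih =>
    intro exp hM hpos resA bA resB sqB r n m B hr hn hm habs hB hKb hinv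
    rw [powLoopA, if_pos hpos, powLoopB, if_pos hpos]
    have hediv : PySem.Int.floordiv exp 2 = exp / 2 :=
      PySem.Int.floordiv_eq_ediv_of_pos (by norm_num)
    by_cases hrec : 0 < PySem.Int.floordiv exp 2
    · -- recurse with the stepped invariant
      by_cases hodd : PySem.Int.mod exp 2 = 1
      · simp only [hodd, if_pos]
        have := inv_stepK hr hn hm habs hB hKb hinv true
        simp only [if_true] at this
        exact ih (PySem.Int.floordiv exp 2).toNat (by rw [hediv]; omega)
          _ rfl hrec _ _ _ _ r n m B hr hn hm habs hB hKb this
      · simp only [hodd, if_false]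
        have := inv_stepK hr hn hm habs hB hKb hinv false
        simp only [Bool.false_eq_true, if_false] at this
        exact ih (PySem.Int.floordiv exp 2).toNat (by rw [hediv]; omega)
          _ rfl hrec _ _ _ _ r n m B hr hn hm habs hB hKb this
    · -- exp = 1: one final multiplication on each side
      have hone : exp = 1 := by rw [hediv] at hrec; omega
      have hodd : PySem.Int.mod exp 2 = 1 := by rw [hone]; decide
      rw [powLoopA, if_neg hrec, powLoopB, if_neg hrec]
      simp only [hodd, if_pos]
      obtain ⟨lA, lB, lS, hbB, hbS, hres, hcs⟩ := hinv
      have hck : ∀ k : Nat, 0 ≤ ckof resB sqB r.toNat k ∧ ckof resB sqB r.toNat k < 2 ^ B.toNat := by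
        intro k
        have h := ckof_bound hm hbB hbS r.toNat k
        exact ⟨h.1, lt_of_le_of_lt h.2 hKb⟩
      rw [scatter_char resA bA hr hn, kmul_char resB sqB hr hm hB hck lB lS, List.map_map]
      apply List.map_congr_left
      intro t ht
      rw [List.mem_range] at ht
      show PySem.Int.mod (dsum resA bA r t) n = PySem.Int.mod (PySem.Int.mod (dsum resB sqB r t) m) n
      apply pymod_congr hn
      calc dsum resA bA r t
          ≡ dsum resB sqB r t [ZMOD n] := dsum_congr_mult hr ⟨lA, lB, lS, hbB, hbS, hres, hcs⟩ ht
        _ ≡ PySem.Int.mod (dsum resB sqB r t) m [ZMOD n] := zmod_abs (habs ▸ (pymod_modeq _ m).symm)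

lemma init_eq {r : Int} (hr : 1 ≤ r) :
    (List.replicate r.toNat (0:Int)).set 0 1 = 1 :: List.replicate (r - 1).toNat (0:Int) := by
  obtain ⟨R', hR⟩ : ∃ R', r.toNat = R' + 1 := ⟨r.toNat - 1, by omega⟩
  have h2 : (r - 1).toNat = R' := by omega
  rw [hR, h2, List.replicate_succ, List.set_cons_zero]

lemma ab_eq : ∀ (base : List Int) (exp : Int) (r : Int) (n : Int),
    1 ≤ r → n ≠ 0 → poly_pow_mod base exp r n = poly_pow_mod_alt base exp r n := by
  intro base exp r n hr hn
  have hr' : (0:Int) < r := by omega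
  have hR : 0 < r.toNat := by omega
  by_cases hexp : exp ≤ 0
  · rw [poly_pow_mod, poly_pow_mod_alt, if_pos hexp, powLoopA, if_neg (by omega : ¬ 0 < exp)]
    exact init_eq hr
  · rw [poly_pow_mod, poly_pow_mod_alt, if_neg hexp]
    set m : Int := ((n.natAbs : Nat) : Int) with hmdef
    have hm : 0 < m := by
      have := Int.natAbs_pos.mpr hn
      omega
    set bl : Nat := PySem.Int.bitLength (r * (m - 1) * (m - 1)) with hbl
    set B : Int := ((bl : Nat) : Int) + 1 with hBdef
    have hB : 0 ≤ B := by positivity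
    have hBtoNat : B.toNat = bl + 1 := by omega
    have hKb : ((r.toNat : Nat) : Int) * (m - 1) ^ 2 < 2 ^ B.toNat := by
      have hx : (0:Int) ≤ r * (m - 1) * (m - 1) := by
        have h0 : (0:Int) ≤ m - 1 := by omega
        have h0r : (0:Int) ≤ r := by omega
        positivity
      have h3 : r * (m - 1) * (m - 1) < ((2:Int)) ^ bl := by
        have h1 := PySem.Int.lt_two_pow_bitLength (r * (m - 1) * (m - 1))
        have hh : ((r * (m - 1) * (m - 1)).natAbs : Int) < (((2:Nat) ^ bl : Nat) : Int) := by
          exact_mod_cast h1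
        rw [Int.natAbs_of_nonneg hx] at hh
        calc r * (m - 1) * (m - 1) < (((2:Nat) ^ bl : Nat) : Int) := hh
          _ = (2:Int) ^ bl := by push_cast; ring
      have hcast : ((r.toNat : Nat) : Int) = r := by omega
      calc ((r.toNat : Nat) : Int) * (m - 1) ^ 2 = r * (m - 1) * (m - 1) := by rw [hcast]; ring
        _ < (2:Int) ^ bl := h3
        _ ≤ (2:Int) ^ (bl + 1) := by
            apply pow_le_pow_right₀ (by norm_num)
            omega
        _ = (2:Int) ^ B.toNat := by rw [hBtoNat]
    apply loopK exp.toNat exp rfl (by omega) _ _ _ _ r n m B hr' hn hm hmdef hB hKb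
    -- the initial invariant
    have hsq := foldCycM_char base hr' (by omega : m ≠ 0)
    have hacc : (List.replicate r.toNat (0:Int)).set 0 1
        = 1 :: List.replicate (r - 1).toNat (0:Int) := init_eq hr
    refine ⟨?_, ?_, ?_, ?_, ?_, ?_, ?_⟩
    · rw [hacc, List.length_cons, List.length_replicate]; omega
    · rw [List.length_cons, List.length_replicate]; omega
    · rw [hsq, List.length_map, List.length_range]
    · intro x hx
      rcases List.mem_cons.mp hx with h | h
      · subst h; exact ⟨PySem.Int.mod_nonneg _ hm, PySem.Int.mod_lt _ hm⟩
      · rw [List.eq_of_mem_replicate h]; exact ⟨le_refl 0, hm⟩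
    · intro x hx
      rw [hsq] at hx
      rcases List.mem_map.mp hx with ⟨t, _, rfl⟩
      exact ⟨PySem.Int.mod_nonneg _ hm, PySem.Int.mod_lt _ hm⟩
    · intro k hk
      rw [hacc]
      match k with
      | 0 =>
        simp only [List.getD_cons_zero]
        exact zmod_abs ((pymod_modeq 1 m).symm)
      | k + 1 =>
        simp only [List.getD_cons_succ]
        have h1 : (List.replicate (r - 1).toNat (0:Int)).getD k 0 = 0 := by
          by_cases h : k < (r - 1).toNat
          · rw [List.getD_eq_getElem _ _ (by simpa using h), List.getElem_replicate]
          · rw [List.getD_eq_default _ _ (by simpa using h)]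
        rw [h1]
    · intro c hc
      rw [hsq, PySem.List.getD_map_range _ _ _ _ hc]
      exact zmod_abs ((pymod_modeq _ m).symm)

-- ===== VERDICT (by name: the statement is the Claim_ definition above) =====
theorem poly_pow_mod_spec : Claim_equal_poly_pow_mod := by
  intro base exp r n _ hpre
  exact ab_eq base exp r n hpre.1 hpre.2
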